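-- pv_equiv track=rewrite | github.com/dsriva03/dsa-training | cvent_prac/peak_occupancy.py | peak_occ
-- ===== SOURCE A (Python) =====
-- def peak_occ(events):
--     arr = []
--     #split events into time, count_of_person
--     for start, end in events:
--         arr.append((start, +1))
--         arr.append((end, -1))
--
--     #sort events
--     arr.sort()
--     #keep track of people in stores with same times
--     max_count = 0
--     curr_count = 0
--     for time, count in arr:
--         curr_count += count
--         max_count = max(max_count, curr_count)
--
--     return max_count
-- ===== SOURCE B (Python) =====
-- def peak_occ(events):
--     starts = sorted(s for s, e in events)
--     ends = sorted(e for s, e in events)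
--     n = len(starts)
--     curr = best = 0
--     i = j = 0
--     while i < n:
--         if j < n and ends[j] <= starts[i]:
--             curr -= 1
--             j += 1
--         else:
--             curr += 1
--             i += 1
--             if curr > best:
--                 best = curr
--     return best
-- ===== Notes on version B (the rewrite author's own statement) =====
-- stated objective: alternative
-- what changed: Instead of sorting one combined list of (time, +1/-1) pairs and sweeping it, B sorts starts and ends separately and walks them with a two-pointer merge (ties advance the ends pointer), stopping as soon as the starts are exhausted since remaining ends can only decrement the counter.
import Mathlib
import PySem

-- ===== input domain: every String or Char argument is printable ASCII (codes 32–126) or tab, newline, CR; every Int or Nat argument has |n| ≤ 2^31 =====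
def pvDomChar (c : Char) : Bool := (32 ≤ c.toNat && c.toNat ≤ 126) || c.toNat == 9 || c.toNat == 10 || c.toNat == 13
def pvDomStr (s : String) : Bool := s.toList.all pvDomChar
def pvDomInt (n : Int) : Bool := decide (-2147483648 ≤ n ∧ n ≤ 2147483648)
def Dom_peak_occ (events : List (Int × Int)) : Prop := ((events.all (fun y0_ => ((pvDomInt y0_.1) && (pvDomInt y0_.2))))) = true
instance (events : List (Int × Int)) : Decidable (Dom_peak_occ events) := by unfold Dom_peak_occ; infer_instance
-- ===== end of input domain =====

-- B replaces A's sort of the combined (time, ±1) event list by two sorted lists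
-- (starts, ends) consumed with a two-pointer walk that stops once starts are
-- exhausted (objective: alternative decomposition; same O(n log n) cost).

-- ===== PORT A =====
def peak_occ (events : List (Int × Int)) : Int :=
  -- arr = []; for start, end in events: arr.append((start, +1)); arr.append((end, -1))
  let arr : List (Int × Int) :=
    events.foldl (fun acc p => (acc ++ [(p.1, (1 : Int))]) ++ [(p.2, (-1 : Int))]) []
  -- arr.sort()  (tuple comparison: first component, then second)
  let arr := PySem.List.sorted2 arr Prod.fst Prod.snd
  -- max_count = 0; curr_count = 0; for time, count in arr: curr_count += count; max_count = max(max_count, curr_count)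
  let st := arr.foldl (fun (s : Int × Int) tc => (max s.1 (s.2 + tc.2), s.2 + tc.2)) (0, 0)
  st.1

-- ===== PORT B =====
-- the while-loop of Source B: state (remaining starts, remaining ends, curr, best)
def pvLoopB : List Int → List Int → Int → Int → Int
  | [], _, _, best => best
  | _ :: ss, [], curr, best =>
      pvLoopB ss [] (curr + 1) (if curr + 1 > best then curr + 1 else best)
  | s :: ss, e :: es, curr, best =>
      if e ≤ s then pvLoopB (s :: ss) es (curr - 1) best
      else pvLoopB ss (e :: es) (curr + 1) (if curr + 1 > best then curr + 1 else best)
  termination_by ss es => ss.length + es.length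

def peak_occ_alt (events : List (Int × Int)) : Int :=
  let starts := PySem.List.sorted (events.map Prod.fst) (fun x => x)
  let ends := PySem.List.sorted (events.map Prod.snd) (fun x => x)
  pvLoopB starts ends 0 0

-- ===== PRECONDITION & SPEC =====
def Spec_peak_occ (events : List (Int × Int)) (out : Int) : Prop := out = peak_occ_alt events
instance (events : List (Int × Int)) (out : Int) : Decidable (Spec_peak_occ events out) := by unfold Spec_peak_occ; infer_instance

-- ===== CLAIM (what is proved, stated in full; the proofs are below) =====
def Claim_equal_peak_occ : Prop := ∀ (events : List (Int × Int)), Dom_peak_occ events → Spec_peak_occ events (peak_occ events)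

-- ===== LEMMAS AND PROOFS =====

-- lexicographic ≤ on (time, tag) pairs, Python's tuple order
def pvR (a b : Int × Int) : Prop := a.1 < b.1 ∨ (a.1 = b.1 ∧ a.2 ≤ b.2)

-- the boolean strict-lex test sorted2 uses for keys Prod.fst, Prod.snd
def pvBef (a b : Int × Int) : Bool :=
  decide (a.1 < b.1) || (!decide (b.1 < a.1) && decide (a.2 < b.2))

theorem pvBef_R {a b : Int × Int} (h : pvBef a b = true) : pvR a b := by
  simp [pvBef] at h
  rcases h with h | ⟨h1, h2⟩
  · exact Or.inl h
  · unfold pvR; omega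

theorem pvBef_not_R {a b : Int × Int} (h : ¬ pvBef a b = true) : pvR b a := by
  simp [pvBef] at h
  unfold pvR; omega

theorem insertBy_perm (x : Int × Int) (l : List (Int × Int)) :
    (PySem.List.insertBy pvBef x l).Perm (x :: l) := by
  induction l with
  | nil => simp [PySem.List.insertBy]
  | cons y ys ih =>
    simp only [PySem.List.insertBy]
    split
    · exact List.Perm.refl _
    · exact ((ih.cons y).trans (List.Perm.swap x y ys))

theorem insertBy_pairwise (x : Int × Int) (l : List (Int × Int))
    (h : l.Pairwise pvR) : (PySem.List.insertBy pvBef x l).Pairwise pvR := by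
  induction l with
  | nil => simp [PySem.List.insertBy, pvR]
  | cons y ys ih =>
    rw [List.pairwise_cons] at h
    simp only [PySem.List.insertBy]
    split
    · rename_i hb
      refine List.pairwise_cons.2 ⟨?_, List.pairwise_cons.2 ⟨h.1, h.2⟩⟩
      intro z hz
      rcases List.mem_cons.1 hz with rfl | hz
      · exact pvBef_R hb
      · have hyz := h.1 z hz
        have hxy := pvBef_R hb
        unfold pvR at *; omega
    · rename_i hb
      refine List.pairwise_cons.2 ⟨?_, ih h.2⟩
      intro z hz
      have hz' := (insertBy_perm x ys).mem_iff.1 hz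
      rcases List.mem_cons.1 hz' with rfl | hz''
      · exact pvBef_not_R hb
      · exact h.1 z hz''

theorem sorted2_pairs_perm (xs : List (Int × Int)) :
    (PySem.List.sorted2 xs Prod.fst Prod.snd).Perm xs :=
  PySem.List.sorted2_perm xs Prod.fst Prod.snd false

theorem sorted2_pairs_pairwise (xs : List (Int × Int)) :
    (PySem.List.sorted2 xs Prod.fst Prod.snd).Pairwise pvR := by
  show (xs.foldl (fun acc x => PySem.List.insertBy pvBef x acc) []).Pairwise pvR
  induction xs using List.reverseRecOn with
  | nil => simp
  | append_singleton ys y ih =>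
    rw [List.foldl_append]
    exact insertBy_pairwise _ _ ih

-- uniqueness of a pvR-ordered arrangement (pvR is a total antisymmetric order)
theorem sorted2_pairs_eq (xs ys : List (Int × Int))
    (hp : ys.Perm xs) (hs : ys.Pairwise pvR) :
    PySem.List.sorted2 xs Prod.fst Prod.snd = ys := by
  refine List.Perm.eq_of_pairwise ?_ (sorted2_pairs_pairwise xs) hs
    ((sorted2_pairs_perm xs).trans hp.symm)
  intro a b _ _ h1 h2
  unfold pvR at h1 h2
  have hab : a.1 = b.1 ∧ a.2 = b.2 := by omega
  exact Prod.ext hab.1 hab.2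

-- the merged (time, ±1) stream B's two-pointer loop walks through
def pvMerge : List Int → List Int → List (Int × Int)
  | [], es => es.map (fun e => (e, (-1 : Int)))
  | s :: ss, [] => (s, 1) :: pvMerge ss []
  | s :: ss, e :: es =>
      if e ≤ s then (e, -1) :: pvMerge (s :: ss) es
      else (s, 1) :: pvMerge ss (e :: es)
  termination_by ss es => ss.length + es.length

theorem pvMerge_perm (ss es : List Int) :
    (pvMerge ss es).Perm (ss.map (fun s => (s, (1 : Int))) ++ es.map (fun e => (e, (-1 : Int)))) := by
  fun_induction pvMerge with
  | case1 es => simp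
  | case2 s ss ih => simpa using ih.cons (s, 1)
  | case3 s ss e es h ih =>
    simp only [List.map_cons]
    exact ((ih.cons (e, -1)).trans List.perm_middle.symm)
  | case4 s ss e es h ih =>
    simpa using ih.cons (s, 1)

theorem pvMerge_mem {ss es : List Int} {p : Int × Int} (hp : p ∈ pvMerge ss es) :
    (∃ s ∈ ss, p = (s, 1)) ∨ (∃ e ∈ es, p = (e, -1)) := by
  have := (pvMerge_perm ss es).mem_iff.1 hp
  simp only [List.mem_append, List.mem_map] at this
  rcases this with ⟨s, hs, rfl⟩ | ⟨e, he, rfl⟩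
  · exact Or.inl ⟨s, hs, rfl⟩
  · exact Or.inr ⟨e, he, rfl⟩

theorem pvMerge_pairwise (ss es : List Int)
    (hss : ss.Pairwise (· ≤ ·)) (hes : es.Pairwise (· ≤ ·)) :
    (pvMerge ss es).Pairwise pvR := by
  fun_induction pvMerge with
  | case1 es =>
    refine List.pairwise_map.2 ?_
    exact hes.imp (fun h => by unfold pvR; omega)
  | case2 s ss ih =>
    rw [List.pairwise_cons] at hss
    refine List.pairwise_cons.2 ⟨?_, ih hss.2 hes⟩
    intro p hp
    rcases pvMerge_mem hp with ⟨s', hs', rfl⟩ | ⟨e', he', rfl⟩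
    · have := hss.1 s' hs'; unfold pvR; omega
    · simp at he'
  | case3 s ss e es h ih =>
    rw [List.pairwise_cons] at hes
    refine List.pairwise_cons.2 ⟨?_, ih hss hes.2⟩
    intro p hp
    rcases pvMerge_mem hp with ⟨s', hs', rfl⟩ | ⟨e', he', rfl⟩
    · have hs1 : s ≤ s' := by
        rcases List.mem_cons.1 hs' with rfl | hmem
        · exact le_refl _
        · exact List.rel_of_pairwise_cons hss hmem
      unfold pvR; omega
    · have := hes.1 e' he'; unfold pvR; omega
  | case4 s ss e es h ih =>
    rw [List.pairwise_cons] at hss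
    refine List.pairwise_cons.2 ⟨?_, ih hss.2 hes⟩
    intro p hp
    rcases pvMerge_mem hp with ⟨s', hs', rfl⟩ | ⟨e', he', rfl⟩
    · have := hss.1 s' hs'; unfold pvR; omega
    · have he1 : e ≤ e' := by
        rcases List.mem_cons.1 he' with rfl | hmem
        · exact le_refl _
        · exact List.rel_of_pairwise_cons hes hmem
      unfold pvR; omega

-- A's sweep step
def pvStep (s : Int × Int) (tc : Int × Int) : Int × Int := (max s.1 (s.2 + tc.2), s.2 + tc.2)

theorem sweep_ends (es : List Int) (best curr : Int) (h : curr ≤ best) :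
    ((es.map (fun e => (e, (-1 : Int)))).foldl pvStep (best, curr)).1 = best := by
  induction es generalizing curr with
  | nil => simp
  | cons e es ih =>
    simp only [List.map_cons, List.foldl_cons, pvStep]
    have : max best (curr + -1) = best := by omega
    rw [this]
    exact ih (curr - 1) (by omega)

theorem loopB_eq_sweep (ss es : List Int) (curr best : Int) (h : curr ≤ best) :
    pvLoopB ss es curr best = ((pvMerge ss es).foldl pvStep (best, curr)).1 := by
  fun_induction pvLoopB with
  | case1 es curr best =>
    simp only [pvMerge]
    exact (sweep_ends es best curr h).symm
  | case2 s ss curr best ih =>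
    simp only [pvMerge, List.foldl_cons, pvStep]
    split_ifs at ih ⊢ with hc
    · rw [show max best (curr + 1) = curr + 1 from by omega]
      exact ih (le_refl _)
    · rw [show max best (curr + 1) = best from by omega]
      exact ih (by omega)
  | case3 s ss e es curr best hle ih =>
    simp only [pvMerge, if_pos hle, List.foldl_cons, pvStep]
    rw [show max best (curr + -1) = best from by omega,
        show curr + -1 = curr - 1 from by ring]
    exact ih (by omega)
  | case4 s ss e es curr best hle ih =>
    simp only [pvMerge, if_neg hle, List.foldl_cons, pvStep]
    split_ifs at ih ⊢ with hc
    · rw [show max best (curr + 1) = curr + 1 from by omega]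
      exact ih (le_refl _)
    · rw [show max best (curr + 1) = best from by omega]
      exact ih (by omega)

-- A's built list is the flat tagged list
theorem arr_eq_flatMap (events : List (Int × Int)) :
    events.foldl (fun acc p => (acc ++ [(p.1, (1 : Int))]) ++ [(p.2, (-1 : Int))]) [] =
      events.flatMap (fun p => [(p.1, (1 : Int)), (p.2, (-1 : Int))]) := by
  have h := PySem.List.foldl_append_eq_flatMap
    (g := fun p : Int × Int => [(p.1, (1 : Int)), (p.2, (-1 : Int))]) (l := events) (acc := [])
  simp only [List.nil_append] at h
  rw [← h]
  apply PySem.List.foldl_congr_mem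
  intro acc x _
  simp

theorem flatMap_perm (events : List (Int × Int)) :
    (events.flatMap (fun p => [(p.1, (1 : Int)), (p.2, (-1 : Int))])).Perm
      ((events.map Prod.fst).map (fun s => (s, (1 : Int))) ++
        (events.map Prod.snd).map (fun e => (e, (-1 : Int)))) := by
  induction events with
  | nil => simp
  | cons p evs ih =>
    simp only [List.flatMap_cons, List.map_cons, List.cons_append]
    refine List.Perm.cons _ ?_
    exact (List.Perm.cons _ ih).trans List.perm_middle.symm

-- ===== VERDICT (by name: the statement is the Claim_ definition above) =====
theorem peak_occ_spec : Claim_equal_peak_occ := by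
  intro events _
  show peak_occ events = peak_occ_alt events
  unfold peak_occ peak_occ_alt
  simp only
  rw [arr_eq_flatMap]
  set S := PySem.List.sorted (events.map Prod.fst) (fun x => x) with hS
  set E := PySem.List.sorted (events.map Prod.snd) (fun x => x) with hE
  have hperm : (pvMerge S E).Perm (events.flatMap (fun p => [(p.1, (1 : Int)), (p.2, (-1 : Int))])) := by
    refine (pvMerge_perm S E).trans ?_
    refine ((List.Perm.append ((PySem.List.sorted_perm _ _ _).map _) ((PySem.List.sorted_perm _ _ _).map _)).trans ?_)
    exact (flatMap_perm events).symm
  have hpw : (pvMerge S E).Pairwise pvR := by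
    apply pvMerge_pairwise
    · have := PySem.List.sorted_pairwise (events.map Prod.fst) (fun x => x)
      simpa using this
    · have := PySem.List.sorted_pairwise (events.map Prod.snd) (fun x => x)
      simpa using this
  rw [sorted2_pairs_eq _ _ hperm hpw]
  have := loopB_eq_sweep S E 0 0 (le_refl 0)
  rw [this]
  rfl
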